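-- pv_equiv track=rewrite | github.com/SMargreitter/ChemCharts | src/chemcharts/core/functions/binning.py | _group_values_bins
-- ===== SOURCE A (Python) =====
-- def _group_values_bins(values: list, sorted_bin_idx: list, bin_idx: list) -> list:
--     grouped_values_bins = []
--     for item in sorted_bin_idx:
--         values_bin = []
--         for idx in range(len(bin_idx)):
--             if item == bin_idx[idx]:
--                 values_bin.append(values[idx])
--         grouped_values_bins.append(values_bin)
--     return grouped_values_bins
-- ===== SOURCE B (Python) =====
-- def _group_values_bins(values: list, sorted_bin_idx: list, bin_idx: list) -> list:
--     groups = {}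
--     for b, v in zip(bin_idx, values):
--         groups.setdefault(b, []).append(v)
--     return [groups.get(item, []) for item in sorted_bin_idx]
-- ===== Notes on version B (the rewrite author's own statement) =====
-- stated objective: alternative
-- what changed: Replaces the per-bin rescan of bin_idx (k passes over n entries) by a single grouping pass over zip(bin_idx, values) into a dict keyed by bin index, then one dict lookup per sorted bin.
import Mathlib
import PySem

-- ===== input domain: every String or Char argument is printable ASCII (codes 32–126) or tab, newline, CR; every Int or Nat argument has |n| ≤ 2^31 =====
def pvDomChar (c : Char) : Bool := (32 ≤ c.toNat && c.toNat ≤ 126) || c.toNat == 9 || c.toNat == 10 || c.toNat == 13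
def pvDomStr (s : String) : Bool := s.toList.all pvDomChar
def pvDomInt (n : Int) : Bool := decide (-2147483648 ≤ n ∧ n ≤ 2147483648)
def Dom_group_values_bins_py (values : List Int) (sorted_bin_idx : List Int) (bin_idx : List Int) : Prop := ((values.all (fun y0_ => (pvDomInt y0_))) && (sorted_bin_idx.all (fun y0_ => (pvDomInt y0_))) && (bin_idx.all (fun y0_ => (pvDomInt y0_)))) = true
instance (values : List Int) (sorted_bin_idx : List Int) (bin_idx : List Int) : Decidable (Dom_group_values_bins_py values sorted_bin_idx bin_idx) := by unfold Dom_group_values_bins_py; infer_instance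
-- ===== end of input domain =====

-- B replaces A's per-bin rescan of bin_idx by a one-pass dict grouping plus one lookup per
-- sorted bin; return values agree wherever A returns (Pre_ excludes exactly A's IndexError inputs).


-- ===== PORT A =====
-- literal port of A: for each item of sorted_bin_idx, rescan all of bin_idx and collect values[idx];
-- values[idx] can raise IndexError in Python — pyGetD's default is unreachable under Pre_.
def group_values_bins_py (values : List Int) (sorted_bin_idx : List Int) (bin_idx : List Int) : List (List Int) :=
  sorted_bin_idx.foldl (fun grouped_values_bins item =>
    grouped_values_bins ++
      [(PySem.List.pyRange 0 bin_idx.length 1).foldl (fun values_bin idx =>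
          if item = PySem.List.pyGetD bin_idx idx 0 then
            values_bin ++ [PySem.List.pyGetD values idx 0]
          else values_bin) []]) []

-- ===== PORT B =====
-- literal port of B: one pass over zip(bin_idx, values) building a dict bin → list, then a lookup per
-- bin; 'groups.setdefault(b, []).append(v)' (in-place append) is rendered exactly by Dict.modify.
def group_values_bins_py_alt (values : List Int) (sorted_bin_idx : List Int) (bin_idx : List Int) : List (List Int) :=
  let groups := (bin_idx.zip values).foldl
    (fun d p => d.modify p.1 [] (fun l => l ++ [p.2])) PySem.Dict.empty
  sorted_bin_idx.map (fun item => groups.getD item [])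

-- ===== PRECONDITION & SPEC =====
-- Pre_ excludes exactly the inputs where A raises IndexError: a bin index stored beyond
-- len(values) that is looked up by some item of sorted_bin_idx.
def Pre_group_values_bins_py (values : List Int) (sorted_bin_idx : List Int) (bin_idx : List Int) : Prop :=
  ∀ b ∈ bin_idx.drop values.length, b ∉ sorted_bin_idx
instance (values : List Int) (sorted_bin_idx : List Int) (bin_idx : List Int) : Decidable (Pre_group_values_bins_py values sorted_bin_idx bin_idx) := by unfold Pre_group_values_bins_py; infer_instance
def pvWitness_group_values_bins_py : List Int × List Int × List Int := ([1, 2, 3], [0, 1, 0], [0, 1, 0])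

def Spec_group_values_bins_py (values : List Int) (sorted_bin_idx : List Int) (bin_idx : List Int) (out : List (List Int)) : Prop := out = group_values_bins_py_alt values sorted_bin_idx bin_idx
instance (values : List Int) (sorted_bin_idx : List Int) (bin_idx : List Int) (out : List (List Int)) : Decidable (Spec_group_values_bins_py values sorted_bin_idx bin_idx out) := by unfold Spec_group_values_bins_py; infer_instance

-- ===== CLAIM (what is proved, stated in full; the proofs are below) =====
def Claim_equal_group_values_bins_py : Prop := ∀ (values : List Int) (sorted_bin_idx : List Int) (bin_idx : List Int), Dom_group_values_bins_py values sorted_bin_idx bin_idx → Pre_group_values_bins_py values sorted_bin_idx bin_idx → Spec_group_values_bins_py values sorted_bin_idx bin_idx (group_values_bins_py values sorted_bin_idx bin_idx)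

-- ===== LEMMAS AND PROOFS =====

-- A's inner loop over range(len(bin_idx)) equals the filtered zip, provided no index beyond
-- len(values) matches item (Pre_ gives this for every item of sorted_bin_idx).
lemma inner_eq_zip_filter (values bin_idx : List Int) (item : Int)
    (h : ∀ b ∈ bin_idx.drop values.length, b ≠ item) :
    (PySem.List.pyRange 0 bin_idx.length 1).foldl (fun values_bin idx =>
        if item = PySem.List.pyGetD bin_idx idx 0 then
          values_bin ++ [PySem.List.pyGetD values idx 0]
        else values_bin) []
      = ((bin_idx.zip values).filter (fun p => p.1 == item)).map (·.2) := by
  set n := bin_idx.length with hn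
  set m := (bin_idx.zip values).length with hm
  have hmn : m ≤ n := by simp [hm, hn, List.length_zip]
  have hmv : m ≤ values.length := by simp [hm, List.length_zip]
  rw [PySem.List.pyRange_one_append 0 (m : Int) (n : Int) (by positivity) (by exact_mod_cast hmn),
      List.foldl_append]
  -- the first segment folds over the zipped pairs
  have h1 : (PySem.List.pyRange 0 (m : Int) 1).foldl (fun values_bin idx =>
        if item = PySem.List.pyGetD bin_idx idx 0 then
          values_bin ++ [PySem.List.pyGetD values idx 0]
        else values_bin) []
      = (bin_idx.zip values).foldl (fun acc p => if item = p.1 then acc ++ [p.2] else acc) [] := by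
    rw [hm]
    rw [← PySem.List.foldl_pyRange_zero_pyGetD (xs := bin_idx.zip values)
          (f := fun acc p => if item = p.1 then acc ++ [p.2] else acc) (d := (0, 0)) (init := [])]
    apply PySem.List.foldl_congr_mem
    intro acc idx hidx
    have hb := (PySem.List.mem_pyRange_one).1 hidx
    have h0 : 0 ≤ idx := hb.1
    have hlt : idx < (m : Int) := by exact_mod_cast hb.2
    have hz : PySem.List.pyGetD (bin_idx.zip values) idx (0, 0) = (bin_idx.zip values)[idx.toNat] :=
      PySem.List.pyGetD_eq_getElem _ _ h0 (by exact_mod_cast hlt)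
    have hb' : PySem.List.pyGetD bin_idx idx 0 = bin_idx[idx.toNat]'(by
        have : idx.toNat < m := by omega
        omega) :=
      PySem.List.pyGetD_eq_getElem _ _ h0 (by
        have : idx.toNat < m := by omega
        push_cast; omega)
    have hv' : PySem.List.pyGetD values idx 0 = values[idx.toNat]'(by
        have : idx.toNat < m := by omega
        omega) :=
      PySem.List.pyGetD_eq_getElem _ _ h0 (by
        have : idx.toNat < m := by omega
        push_cast; omega)
    rw [hz, hb', hv', List.getElem_zip]
  -- the second segment never matches: its indices lie beyond len(values)
  have h2 : ∀ (init : List Int), (PySem.List.pyRange (m : Int) (n : Int) 1).foldl (fun values_bin idx =>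
        if item = PySem.List.pyGetD bin_idx idx 0 then
          values_bin ++ [PySem.List.pyGetD values idx 0]
        else values_bin) init = init := by
    intro init
    rw [PySem.List.foldl_congr_mem (g := fun acc _ => acc)]
    · exact List.foldl_fixed _
    · intro acc idx hidx
      have hb := (PySem.List.mem_pyRange_one).1 hidx
      have hge : (m : Int) ≤ idx := hb.1
      have hlt : idx < (n : Int) := hb.2
      have h0 : (0:Int) ≤ idx := le_trans (by positivity) hge
      have hltn : idx.toNat < n := by omega
      have hbe : PySem.List.pyGetD bin_idx idx 0 = bin_idx[idx.toNat]'(by omega) :=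
        PySem.List.pyGetD_eq_getElem _ _ h0 (by omega)
      have hmv' : m = min n values.length := by simp [hm, hn, List.length_zip, Nat.min_comm]
      have hvlen : values.length ≤ idx.toNat := by omega
      have hdrop : bin_idx[idx.toNat]'(by omega) ∈ bin_idx.drop values.length := by
        have hlt2 : idx.toNat - values.length < (bin_idx.drop values.length).length := by
          simp [List.length_drop]; omega
        refine (List.mem_iff_getElem).2 ⟨idx.toNat - values.length, hlt2, ?_⟩
        rw [List.getElem_drop]
        congr 1
        omega
      have hne := h _ hdrop
      rw [hbe, if_neg (fun he => hne he.symm)]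
  rw [h1, h2]
  have hfun : (fun (acc : List Int) (p : Int × Int) => if item = p.1 then acc ++ [p.2] else acc)
      = (fun acc p => if (fun q : Int × Int => q.1 == item) p then acc ++ [p.2] else acc) := by
    funext acc p
    by_cases hc : item = p.1
    · simp [hc]
    · have hb : (p.1 == item) = false := by
        simp only [beq_eq_false_iff_ne]
        exact fun he => hc he.symm
      simp [hb, hc]
  rw [hfun, PySem.List.foldl_append_if (fun q : Int × Int => q.1 == item) (fun p : Int × Int => p.2),
      List.nil_append]

theorem group_values_bins_py_spec : Claim_equal_group_values_bins_py := by
  intro values sorted_bin_idx bin_idx _ hpre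
  unfold Spec_group_values_bins_py group_values_bins_py group_values_bins_py_alt
  rw [PySem.List.foldl_append_singleton_eq_map]
  simp only [List.nil_append]
  apply List.map_congr_left
  intro item hmem
  rw [inner_eq_zip_filter values bin_idx item (fun b hb hbe => hpre b hb (hbe ▸ hmem)),
      PySem.Dict.getD_foldl_modify_append, PySem.Dict.getD_empty, List.nil_append]
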